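-- pv_equiv track=rewrite | github.com/Danti0ch/task_manager | auxil_table.py | get_data_in_scopes
-- ===== SOURCE A (Python) =====
-- def get_data_in_scopes(parse_data):
--
--     data = ""
--
--     was_scope = 0
--     for block in parse_data:
--         if '"' in block:
--             if was_scope:
--                 data += block + " "
--                 break
--             was_scope = 1
--
--         if was_scope:
--             data += block + " "
--
--     return data
-- ===== SOURCE B (Python) =====
-- def get_data_in_scopes(parse_data):
--     blocks = list(parse_data)
--     qs = [i for i, b in enumerate(blocks) if '"' in b]
--     if not qs:
--         return ""
--     end = qs[1] if len(qs) > 1 else len(blocks) - 1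
--     return "".join(b + " " for b in blocks[qs[0]:end + 1])
-- ===== Notes on version B (the rewrite author's own statement) =====
-- stated objective: simpler
-- what changed: Replaced A's one-pass state machine (was_scope flag, incremental += and break) by a locate-slice-join decomposition: collect the indices of quote-containing blocks, take the slice from the first to the second (or to the end), and join each block with a trailing space.
import Mathlib
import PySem

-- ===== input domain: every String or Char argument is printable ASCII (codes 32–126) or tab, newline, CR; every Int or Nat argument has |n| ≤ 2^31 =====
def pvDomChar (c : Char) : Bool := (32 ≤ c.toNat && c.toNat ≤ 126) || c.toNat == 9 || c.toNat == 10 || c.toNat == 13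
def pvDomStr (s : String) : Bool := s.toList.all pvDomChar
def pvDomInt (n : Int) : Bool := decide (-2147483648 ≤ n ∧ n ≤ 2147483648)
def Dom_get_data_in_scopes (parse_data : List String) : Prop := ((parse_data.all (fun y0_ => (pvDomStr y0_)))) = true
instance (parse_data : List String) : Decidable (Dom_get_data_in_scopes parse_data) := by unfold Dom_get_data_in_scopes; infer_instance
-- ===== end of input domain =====

-- One honest line: B replaces A's one-pass state machine (was_scope flag + break) by
-- locate-the-quote-indices, slice, and join — a simpler decomposition; no speed claim.
-- ===== PORT A =====
def pvLoopA : List String → String → Bool → String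
  | [], data, _ => data
  | block :: rest, data, was_scope =>
    if PySem.Str.isIn "\"" block then
      if was_scope then data ++ block ++ " "        -- break
      else pvLoopA rest (data ++ block ++ " ") true -- was_scope := 1, then the second if appends
    else
      if was_scope then pvLoopA rest (data ++ block ++ " ") true
      else pvLoopA rest data false

def get_data_in_scopes (parse_data : List String) : String :=
  pvLoopA parse_data "" false

-- ===== PORT B =====
def get_data_in_scopes_alt (parse_data : List String) : String :=
  let blocks := parse_data
  let qs : List Int :=
    ((PySem.List.enumerate blocks 0).filter (fun p => PySem.Str.isIn "\"" p.2)).map Prod.fst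
  match qs with
  | [] => ""
  | q0 :: qrest =>
    let e : Int := match qrest with
      | q1 :: _ => q1
      | [] => (blocks.length : Int) - 1
    PySem.Str.join "" ((PySem.List.slice blocks (some q0) (some (e + 1))).map (fun b => b ++ " "))

-- ===== PRECONDITION & SPEC =====
def Spec_get_data_in_scopes (parse_data : List String) (out : String) : Prop := out = get_data_in_scopes_alt parse_data
instance (parse_data : List String) (out : String) : Decidable (Spec_get_data_in_scopes parse_data out) := by unfold Spec_get_data_in_scopes; infer_instance

-- ===== CLAIM (what is proved, stated in full; the proofs are below) =====
def Claim_equal_get_data_in_scopes : Prop := ∀ (parse_data : List String), Dom_get_data_in_scopes parse_data → Spec_get_data_in_scopes parse_data (get_data_in_scopes parse_data)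

-- ===== LEMMAS AND PROOFS =====

-- abbreviation for the test used by both programs
def pvQ (b : String) : Bool := PySem.Str.isIn "\"" b

-- the "scope is open" phase of A: append each block (+" "), stop after a quote block
def pvTail : List String → String
  | [] => ""
  | b :: t => if pvQ b then b ++ " " else b ++ " " ++ pvTail t

theorem join_empty_nil : PySem.Str.join "" ([] : List String) = "" := by
  rw [PySem.Str.join]
  simp [PySem.Chars.join, List.intercalate]

theorem join_empty_cons (x : String) (l : List String) :
    PySem.Str.join "" (x :: l) = x ++ PySem.Str.join "" l := by
  cases l with
  | nil =>
    rw [PySem.Str.join, PySem.Str.join]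
    simp [PySem.Chars.join, List.intercalate]
  | cons y t =>
    rw [PySem.Str.join, List.map_cons, List.map_cons, PySem.Chars.join_cons_cons]
    simp [PySem.Str.join]

theorem loopA_true (l : List String) (d : String) :
    pvLoopA l d true = d ++ pvTail l := by
  induction l generalizing d with
  | nil => simp [pvLoopA, pvTail]
  | cons b t ih =>
    by_cases h : PySem.Str.isIn "\"" b = true
    all_goals simp only [Bool.not_eq_true] at h
    all_goals simp [PySem.Str.isIn] at h
    · simp [pvLoopA, pvTail, pvQ, PySem.Str.isIn, h, String.append_assoc]
    · simp [pvLoopA, pvTail, pvQ, PySem.Str.isIn, h, ih, String.append_assoc]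

theorem loopA_false_skip (u : List String) (s : List String)
    (h : ∀ b ∈ u, pvQ b = false) :
    pvLoopA (u ++ s) "" false = pvLoopA s "" false := by
  induction u with
  | nil => rfl
  | cons b t ih =>
    have hb : PySem.Str.isIn "\"" b = false := h b (List.mem_cons_self ..)
    simp only [List.cons_append, pvLoopA, hb, Bool.false_eq_true, if_false]
    exact ih (fun x hx => h x (List.mem_cons_of_mem _ hx))

theorem tail_of_no_quote (l : List String) (h : ∀ b ∈ l, pvQ b = false) :
    pvTail l = PySem.Str.join "" (l.map (· ++ " ")) := by
  induction l with
  | nil => simp [pvTail, join_empty_nil]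
  | cons b t ih =>
    have hb : pvQ b = false := h b (List.mem_cons_self ..)
    simp only [pvTail, hb, Bool.false_eq_true, if_false, List.map_cons, join_empty_cons]
    rw [ih (fun x hx => h x (List.mem_cons_of_mem _ hx)), String.append_assoc]

theorem tail_through (u : List String) (q : String) (v : List String)
    (hu : ∀ b ∈ u, pvQ b = false) (hq : pvQ q = true) :
    pvTail (u ++ q :: v) = PySem.Str.join "" ((u ++ [q]).map (· ++ " ")) := by
  induction u with
  | nil => simp [pvTail, hq, join_empty_cons, join_empty_nil]
  | cons b t ih =>
    have hb : pvQ b = false := hu b (List.mem_cons_self ..)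
    simp only [List.cons_append, pvTail, hb, Bool.false_eq_true, if_false, List.map_cons,
      join_empty_cons]
    rw [ih (fun x hx => hu x (List.mem_cons_of_mem _ hx)), String.append_assoc]

theorem enum_filter_none (l : List String) (s : Int)
    (h : ∀ b ∈ l, pvQ b = false) :
    (PySem.List.enumerate l s).filter (fun p => PySem.Str.isIn "\"" p.2) = [] := by
  induction l generalizing s with
  | nil => simp [PySem.List.enumerate_nil]
  | cons b t ih =>
    have hb : PySem.Str.isIn "\"" b = false := h b (List.mem_cons_self ..)
    simp only [PySem.List.enumerate_cons, List.filter_cons, hb, Bool.false_eq_true, if_false]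
    exact ih (s + 1) (fun x hx => h x (List.mem_cons_of_mem _ hx))

-- every list splits at its first quote block, or has none
theorem split_first_quote (l : List String) :
    (∀ b ∈ l, pvQ b = false) ∨
    ∃ u q v, l = u ++ q :: v ∧ (∀ b ∈ u, pvQ b = false) ∧ pvQ q = true := by
  induction l with
  | nil => exact Or.inl (by simp)
  | cons b t ih =>
    by_cases hb : pvQ b = true
    · exact Or.inr ⟨[], b, t, by simp, by simp, hb⟩
    · simp only [Bool.not_eq_true] at hb
      rcases ih with h | ⟨u, q, v, rfl, hu, hq⟩
      · refine Or.inl ?_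
        intro x hx
        rcases List.mem_cons.mp hx with rfl | hx
        · exact hb
        · exact h x hx
      · refine Or.inr ⟨b :: u, q, v, by simp, ?_, hq⟩
        intro x hx
        rcases List.mem_cons.mp hx with rfl | hx
        · exact hb
        · exact hu x hx

theorem B_eval_one (u : List String) (q : String) (v : List String)
    (hu : ∀ b ∈ u, pvQ b = false) (hq : pvQ q = true)
    (hv : ∀ b ∈ v, pvQ b = false) :
    get_data_in_scopes_alt (u ++ q :: v) =
      PySem.Str.join "" ((q :: v).map (· ++ " ")) := by
  have hq' : PySem.Str.isIn "\"" q = true := hq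
  simp only [get_data_in_scopes_alt, PySem.List.enumerate_append, List.filter_append,
    enum_filter_none u 0 hu, PySem.List.enumerate_cons, List.filter_cons, hq', if_true,
    enum_filter_none v _ hv, List.nil_append, List.map_cons, List.map_nil]
  have hlen : ((u ++ q :: v).length : Int) - 1 + 1
      = (u.length : Int) + ((v.length + 1 : ℕ) : Int) := by
    push_cast [List.length_append, List.length_cons]
    ring
  rw [hlen, zero_add, PySem.List.slice_natCast_add, List.drop_left,
    List.take_of_length_le (by simp)]
  rw [List.map_cons]

theorem take_len_succ {α : Type} (w : List α) (r : α) (s : List α) :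
    (w ++ r :: s).take (w.length + 1) = w ++ [r] := by
  induction w with
  | nil => simp
  | cons a t ih => simpa using ih

theorem B_eval_two (u : List String) (q : String) (w : List String) (r : String)
    (s : List String)
    (hu : ∀ b ∈ u, pvQ b = false) (hq : pvQ q = true)
    (hw : ∀ b ∈ w, pvQ b = false) (hr : pvQ r = true) :
    get_data_in_scopes_alt (u ++ q :: (w ++ r :: s)) =
      PySem.Str.join "" ((q :: (w ++ [r])).map (· ++ " ")) := by
  have hq' : PySem.Str.isIn "\"" q = true := hq
  have hr' : PySem.Str.isIn "\"" r = true := hr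
  simp only [get_data_in_scopes_alt, PySem.List.enumerate_append, List.filter_append,
    enum_filter_none u 0 hu, PySem.List.enumerate_cons, List.filter_cons, hq', hr', if_true,
    enum_filter_none w _ hw, List.nil_append, List.map_cons]
  have hlen : (0 : Int) + (u.length : Int) + 1 + (w.length : Int) + 1
      = (u.length : Int) + ((w.length + 2 : ℕ) : Int) := by
    push_cast
    ring
  rw [hlen, zero_add, PySem.List.slice_natCast_add, List.drop_left]
  have htake : (q :: (w ++ r :: s)).take (w.length + 2) = q :: (w ++ [r]) := by
    simpa using take_len_succ w r s
  rw [htake]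
  simp

theorem main_eq (parse_data : List String) :
    get_data_in_scopes parse_data = get_data_in_scopes_alt parse_data := by
  rcases split_first_quote parse_data with h | ⟨u, q, v, rfl, hu, hq⟩
  · have hA : get_data_in_scopes parse_data = "" := by
      have := loopA_false_skip parse_data [] h
      simpa [get_data_in_scopes, pvLoopA] using this
    have hB : get_data_in_scopes_alt parse_data = "" := by
      simp only [get_data_in_scopes_alt]
      rw [enum_filter_none parse_data 0 h]
      rfl
    rw [hA, hB]
  · have hq' : PySem.Str.isIn "\"" q = true := hq
    have hA : get_data_in_scopes (u ++ q :: v) = (q ++ " ") ++ pvTail v := by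
      rw [get_data_in_scopes, loopA_false_skip u (q :: v) hu]
      simp only [pvLoopA, hq', if_true, Bool.false_eq_true, if_false, loopA_true,
        String.empty_append, String.append_assoc]
    rcases split_first_quote v with hv | ⟨w, r, s, rfl, hw, hr⟩
    · rw [hA, tail_of_no_quote v hv, B_eval_one u q v hu hq hv, List.map_cons,
        join_empty_cons, String.append_assoc]
    · rw [hA, tail_through w r s hw hr, B_eval_two u q w r s hu hq hw hr, List.map_cons,
        join_empty_cons, String.append_assoc]

-- ===== VERDICT (by name: the statement is the Claim_ definition above) =====
theorem get_data_in_scopes_spec : Claim_equal_get_data_in_scopes := by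
  intro parse_data _
  unfold Spec_get_data_in_scopes
  exact main_eq parse_data
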